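-- pv_equiv track=rewrite | github.com/liuwei464976266/mygit | 实验4.py | getColsSymbol
-- ===== SOURCE A (Python) =====
-- def getColsSymbol(points):  # 取出各列中奖位置
--     symbol13_list = []
--     col1, col2, col3, col4, col5 = {}, {}, {}, {}, {}
--     for i in range(len(points)):
--         if points[i] == 11:
--             symbol13_list.append(i)
--         elif i % 5 == 0:
--             col1[i] = points[i]
--         elif i % 5 == 1:
--             col2[i] = points[i]
--         elif i % 5 == 2:
--             col3[i] = points[i]
--         elif i % 5 == 3:
--             col4[i] = points[i]
--         elif i % 5 == 4:
--             col5[i] = points[i]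
--     return col1, col2, col3, col4, col5, symbol13_list
-- ===== SOURCE B (Python) =====
-- def getColsSymbol(points):  # same result via one enumerate + per-column filter passes
--     idx = list(enumerate(points))
--     symbol13_list = [i for i, p in idx if p == 11]
--
--     def col(k):
--         return {i: p for i, p in idx if p != 11 and i % 5 == k}
--
--     return col(0), col(1), col(2), col(3), col(4), symbol13_list
-- ===== Notes on version B (the rewrite author's own statement) =====
-- stated objective: alternative
-- what changed: Replaces the single mod-5 dispatch loop with six accumulators by one enumerate snapshot plus per-column filter comprehensions (a list comprehension for the symbol list and a dict comprehension per column).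
import Mathlib
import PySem

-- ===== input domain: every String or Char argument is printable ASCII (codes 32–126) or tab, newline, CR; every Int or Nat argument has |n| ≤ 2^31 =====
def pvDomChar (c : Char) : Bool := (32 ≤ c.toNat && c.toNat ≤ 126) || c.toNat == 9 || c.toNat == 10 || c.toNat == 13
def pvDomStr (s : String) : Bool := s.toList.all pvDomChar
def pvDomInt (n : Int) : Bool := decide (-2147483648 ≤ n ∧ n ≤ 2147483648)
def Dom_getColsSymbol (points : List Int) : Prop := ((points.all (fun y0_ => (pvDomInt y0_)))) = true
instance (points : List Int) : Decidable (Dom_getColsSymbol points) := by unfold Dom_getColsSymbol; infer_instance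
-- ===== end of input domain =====

-- B replaces A's single mod-5 dispatch loop (six accumulators) by one enumerate pass
-- plus per-column filter comprehensions; same result, alternative decomposition.


-- ===== PORT A =====
-- the loop body of A: one step of 'for i in range(len(points))' with the elif chain
def pvStepA (points : List Int)
    (st : PySem.Dict Int Int × PySem.Dict Int Int × PySem.Dict Int Int × PySem.Dict Int Int × PySem.Dict Int Int × List Int)
    (i : Int) :
    PySem.Dict Int Int × PySem.Dict Int Int × PySem.Dict Int Int × PySem.Dict Int Int × PySem.Dict Int Int × List Int :=
  let p := PySem.List.pyGetD points i 0      -- points[i]; i ∈ range(len(points)) is always in range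
  let (c1, c2, c3, c4, c5, sym) := st
  if p = 11 then (c1, c2, c3, c4, c5, sym ++ [i])
  else if PySem.Int.mod i 5 = 0 then (c1.insert i p, c2, c3, c4, c5, sym)
  else if PySem.Int.mod i 5 = 1 then (c1, c2.insert i p, c3, c4, c5, sym)
  else if PySem.Int.mod i 5 = 2 then (c1, c2, c3.insert i p, c4, c5, sym)
  else if PySem.Int.mod i 5 = 3 then (c1, c2, c3, c4.insert i p, c5, sym)
  else if PySem.Int.mod i 5 = 4 then (c1, c2, c3, c4, c5.insert i p, sym)
  else (c1, c2, c3, c4, c5, sym)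

def getColsSymbol (points : List Int) : (List (Int × Int)) × (List (Int × Int)) × (List (Int × Int)) × (List (Int × Int)) × (List (Int × Int)) × List Int :=
  let r := (PySem.List.pyRange 0 (PySem.List.len points) 1).foldl (pvStepA points)
    (PySem.Dict.empty, PySem.Dict.empty, PySem.Dict.empty, PySem.Dict.empty, PySem.Dict.empty, [])
  (r.1.items, r.2.1.items, r.2.2.1.items, r.2.2.2.1.items, r.2.2.2.2.1.items, r.2.2.2.2.2)

-- ===== PORT B =====
-- {i: p for i, p in idx if p != 11 and i % 5 == k}
def pvColB (idx : List (Int × Int)) (k : Int) : PySem.Dict Int Int :=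
  (idx.filter (fun ip => ip.2 != 11 && PySem.Int.mod ip.1 5 == k)).foldl
    (fun d ip => d.insert ip.1 ip.2) PySem.Dict.empty

def getColsSymbol_alt (points : List Int) : (List (Int × Int)) × (List (Int × Int)) × (List (Int × Int)) × (List (Int × Int)) × (List (Int × Int)) × List Int :=
  let idx := PySem.List.enumerate points
  let sym := (idx.filter (fun ip => ip.2 == 11)).map (fun ip => ip.1)
  ((pvColB idx 0).items, (pvColB idx 1).items, (pvColB idx 2).items,
   (pvColB idx 3).items, (pvColB idx 4).items, sym)

-- ===== PRECONDITION & SPEC =====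
def Spec_getColsSymbol (points : List Int) (out : (List (Int × Int)) × (List (Int × Int)) × (List (Int × Int)) × (List (Int × Int)) × (List (Int × Int)) × List Int) : Prop := out = getColsSymbol_alt points
instance (points : List Int) (out : (List (Int × Int)) × (List (Int × Int)) × (List (Int × Int)) × (List (Int × Int)) × (List (Int × Int)) × List Int) : Decidable (Spec_getColsSymbol points out) := by
  unfold Spec_getColsSymbol
  haveI h4 : DecidableEq ((List (Int × Int)) × (List (Int × Int)) × (List (Int × Int)) × List Int) := inferInstance
  haveI h5 : DecidableEq ((List (Int × Int)) × (List (Int × Int)) × (List (Int × Int)) × (List (Int × Int)) × List Int) := inferInstance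
  infer_instance

-- ===== CLAIM (what is proved, stated in full; the proofs are below) =====
def Claim_equal_getColsSymbol : Prop := ∀ (points : List Int), Dom_getColsSymbol points → Spec_getColsSymbol points (getColsSymbol points)

-- ===== LEMMAS AND PROOFS =====

-- one column's view of A's loop step
def pvColStep (points : List Int) (k : Int) (d : PySem.Dict Int Int) (i : Int) : PySem.Dict Int Int :=
  let p := PySem.List.pyGetD points i 0
  if p = 11 then d else if PySem.Int.mod i 5 = k then d.insert i p else d

-- the symbol list's view of A's loop step
def pvSymStep (points : List Int) (l : List Int) (i : Int) : List Int :=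
  if PySem.List.pyGetD points i 0 = 11 then l ++ [i] else l

theorem pvStepA_split (points : List Int) (st : PySem.Dict Int Int × PySem.Dict Int Int × PySem.Dict Int Int × PySem.Dict Int Int × PySem.Dict Int Int × List Int) (i : Int) :
    pvStepA points st i =
      (pvColStep points 0 st.1 i, pvColStep points 1 st.2.1 i, pvColStep points 2 st.2.2.1 i,
       pvColStep points 3 st.2.2.2.1 i, pvColStep points 4 st.2.2.2.2.1 i,
       pvSymStep points st.2.2.2.2.2 i) := by
  obtain ⟨c1, c2, c3, c4, c5, sym⟩ := st
  simp only [pvStepA, pvColStep, pvSymStep]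
  split_ifs <;> simp_all <;> (exfalso; omega)

theorem pvFoldA_split (points : List Int) (l : List Int)
    (c1 c2 c3 c4 c5 : PySem.Dict Int Int) (sym : List Int) :
    l.foldl (pvStepA points) (c1, c2, c3, c4, c5, sym) =
      (l.foldl (pvColStep points 0) c1, l.foldl (pvColStep points 1) c2,
       l.foldl (pvColStep points 2) c3, l.foldl (pvColStep points 3) c4,
       l.foldl (pvColStep points 4) c5, l.foldl (pvSymStep points) sym) := by
  induction l generalizing c1 c2 c3 c4 c5 sym with
  | nil => rfl
  | cons x xs ih => simp only [List.foldl_cons, pvStepA_split, ih]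

theorem pvColStep_ite (points : List Int) (k : Int) :
    pvColStep points k = fun d i =>
      if PySem.List.pyGetD points i 0 ≠ 11 ∧ PySem.Int.mod i 5 = k
      then d.insert i (PySem.List.pyGetD points i 0) else d := by
  funext d i
  simp only [pvColStep]
  split_ifs <;> simp_all

-- each column of A equals B's filtered dict comprehension over enumerate
theorem pvCol_eq (points : List Int) (k : Int) :
    (PySem.List.pyRange 0 (PySem.List.len points) 1).foldl (pvColStep points k) PySem.Dict.empty =
      pvColB (PySem.List.enumerate points) k := by
  rw [pvColStep_ite, PySem.List.foldl_ite_eq_foldl_filter, pvColB,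
    PySem.List.enumerate_eq_map_pyRange points 0, List.filter_map, List.foldl_map]
  congr 1
  apply List.filter_congr
  intro i _
  by_cases h1 : PySem.List.pyGetD points i 0 = 11 <;> by_cases h2 : i % 5 = k <;> simp [h1, h2]

theorem pvSym_eq (points : List Int) :
    (PySem.List.pyRange 0 (PySem.List.len points) 1).foldl (pvSymStep points) [] =
      ((PySem.List.enumerate points).filter (fun ip => ip.2 == 11)).map (fun ip => ip.1) := by
  have hstep : pvSymStep points = fun l i => if PySem.List.pyGetD points i 0 = 11 then l ++ [i] else l := rfl
  rw [hstep, PySem.List.foldl_append_ite_eq_filter, PySem.List.enumerate_eq_map_pyRange points 0,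
    List.filter_map, List.map_map]
  simp only [Function.comp_def]
  simp
  apply List.filter_congr
  intro i _
  by_cases h : PySem.List.pyGetD points i 0 = 11 <;> simp [h]

-- ===== VERDICT (by name: the statement is the Claim_ definition above) =====
theorem getColsSymbol_spec : Claim_equal_getColsSymbol := by
  intro points _
  show getColsSymbol points = getColsSymbol_alt points
  simp only [getColsSymbol, getColsSymbol_alt, pvFoldA_split, pvCol_eq, pvSym_eq]
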